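-- pv_equiv track=rewrite | github.com/laurentimzen/Intel-War | play_war.py | remove_war_cards_from_hand
-- ===== SOURCE A (Python) =====
-- def remove_war_cards_from_hand(hand):
--     war_cards = []
--     if len(hand) < 4:  # there are not enough cards in the hand to go to war
--         for count in range(len(hand)):
--             war_cards.append(hand.pop(0))
--         return war_cards
--     else:
--         for count in range(3):
--             war_cards.append(hand.pop(0))
--         return war_cards
-- ===== SOURCE B (Python) =====
-- def remove_war_cards_from_hand(hand):
--     # slice-based: copy the first min(len,3) cards, delete them in one slice op
--     n = min(len(hand), 3)
--     war_cards = hand[:n]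
--     del hand[:n]
--     return war_cards
-- ===== Notes on version B (the rewrite author's own statement) =====
-- stated objective: simpler
-- what changed: Replaces the two-branch pop(0) loop with a single closed form: n = min(len(hand), 3), slice copy hand[:n] and one slice deletion, no loop and no branch.
import Mathlib
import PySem

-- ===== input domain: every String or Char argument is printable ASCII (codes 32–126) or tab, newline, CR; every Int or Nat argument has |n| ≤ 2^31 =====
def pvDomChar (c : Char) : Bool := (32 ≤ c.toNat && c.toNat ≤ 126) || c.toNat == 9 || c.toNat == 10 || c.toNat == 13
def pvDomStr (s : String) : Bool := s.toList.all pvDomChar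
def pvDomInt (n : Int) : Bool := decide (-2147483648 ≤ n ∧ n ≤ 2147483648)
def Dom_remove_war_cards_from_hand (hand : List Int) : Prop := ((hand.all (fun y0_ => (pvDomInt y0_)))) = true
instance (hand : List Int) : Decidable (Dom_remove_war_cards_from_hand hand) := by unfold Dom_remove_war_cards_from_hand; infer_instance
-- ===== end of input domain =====

-- B replaces A's two-branch pop(0) loop with take (min len 3) (one slice copy + slice delete);
-- both mutate the caller's list the same way in Python; the theorem is about the return value.


-- ===== PORT A =====
-- one iteration of A's loop body: war_cards.append(hand.pop(0))
def pvPopStep (st : List Int × List Int) (_ : Nat) : List Int × List Int :=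
  match st.2 with
  | [] => st
  | h :: t => (st.1 ++ [h], t)

def remove_war_cards_from_hand (hand : List Int) : List Int :=
  if hand.length < 4 then
    ((List.range hand.length).foldl pvPopStep ([], hand)).1
  else
    ((List.range 3).foldl pvPopStep ([], hand)).1

-- ===== PORT B =====
def remove_war_cards_from_hand_alt (hand : List Int) : List Int :=
  hand.take (min hand.length 3)

-- ===== PRECONDITION & SPEC =====
def Spec_remove_war_cards_from_hand (hand : List Int) (out : List Int) : Prop := out = remove_war_cards_from_hand_alt hand
instance (hand : List Int) (out : List Int) : Decidable (Spec_remove_war_cards_from_hand hand out) := by unfold Spec_remove_war_cards_from_hand; infer_instance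

-- ===== CLAIM (what is proved, stated in full; the proofs are below) =====
def Claim_equal_remove_war_cards_from_hand : Prop := ∀ (hand : List Int), Dom_remove_war_cards_from_hand hand → Spec_remove_war_cards_from_hand hand (remove_war_cards_from_hand hand)

-- ===== LEMMAS AND PROOFS =====
theorem pvPopStep_loop (k : Nat) (xs acc : List Int) (hk : k ≤ xs.length) :
    (List.range k).foldl pvPopStep (acc, xs) = (acc ++ xs.take k, xs.drop k) := by
  induction k generalizing acc with
  | zero => simp
  | succ n ih =>
    rw [List.range_succ, List.foldl_append, ih acc (Nat.le_of_succ_le hk)]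
    have hn : n < xs.length := hk
    have hd : xs.drop n = xs[n] :: xs.drop (n + 1) := by
      rw [List.drop_eq_getElem_cons hn]
    simp only [List.foldl_cons, List.foldl_nil, pvPopStep, hd]
    rw [List.take_succ, List.getElem?_eq_getElem hn]
    simp

-- ===== VERDICT (by name: the statement is the Claim_ definition above) =====
theorem remove_war_cards_from_hand_spec : Claim_equal_remove_war_cards_from_hand := by
  intro hand _
  unfold Spec_remove_war_cards_from_hand remove_war_cards_from_hand remove_war_cards_from_hand_alt
  split_ifs with h
  · rw [pvPopStep_loop _ _ _ (le_refl _), Nat.min_eq_left (by omega : hand.length ≤ 3)]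
    simp
  · rw [pvPopStep_loop _ _ _ (by omega : 3 ≤ hand.length), Nat.min_eq_right (by omega : 3 ≤ hand.length)]
    simp
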